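-- pv_equiv track=rewrite | github.com/StarsExpress/LeetCode-Repository | bit_manipulation/binary_concatenation.py | concatenate_binary_strings
-- ===== SOURCE A (Python) =====
-- def concatenate_binary_strings(n: int):  # LeetCode Q.1680.
--     """Return decimal value of concatenated binary strings from 1 to n."""
--     decimal_value = 0
--     threshold, current_len = 2, 1  # Threshold is always a power of 2.
--     for num in range(1, n + 1):
--         if num >= threshold:  # This number's bin format adds current length by 1.
--             threshold *= 2
--             current_len += 1
--
--         decimal_value *= 2 ** current_len  # Enlarge latest value by 2 ** current len.
--         decimal_value += num
--         decimal_value %= (10 ** 9 + 7)  # Required to control size.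
--
--     return decimal_value
-- ===== SOURCE B (Python) =====
-- def concatenate_binary_strings(n: int):  # LeetCode Q.1680.
--     """Return decimal value of concatenated binary strings from 1 to n."""
--     mod = 10 ** 9 + 7
--     total, weight = 0, 1
--     for num in range(n, 0, -1):  # back-to-front: weight of num is 2^(bits after it)
--         total = (total + num * weight) % mod
--         weight = weight * 2 ** num.bit_length() % mod
--     return total
-- ===== Notes on version B (the rewrite author's own statement) =====
-- stated objective: alternative
-- what changed: B iterates downward over the range, maintaining each number's positional weight (a modular power of two from the bit lengths seen so far) and summing num*weight, instead of A's forward Horner loop that shifts the running value and tracks a power-of-two threshold/length pair.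
import Mathlib
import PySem

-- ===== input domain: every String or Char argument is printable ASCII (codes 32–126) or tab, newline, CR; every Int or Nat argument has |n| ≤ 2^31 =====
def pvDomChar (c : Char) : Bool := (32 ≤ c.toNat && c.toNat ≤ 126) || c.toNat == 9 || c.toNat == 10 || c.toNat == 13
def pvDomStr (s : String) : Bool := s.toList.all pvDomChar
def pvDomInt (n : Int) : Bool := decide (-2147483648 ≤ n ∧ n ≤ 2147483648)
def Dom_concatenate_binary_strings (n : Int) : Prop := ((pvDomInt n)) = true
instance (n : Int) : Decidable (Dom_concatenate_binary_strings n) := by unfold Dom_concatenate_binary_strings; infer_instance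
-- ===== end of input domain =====

-- B traverses n..1 back-to-front, summing num * (modular weight of its bit position),
-- instead of A's forward Horner loop with threshold/length tracking; alternative decomposition, same O(n).

-- ===== PORT A =====
-- one loop iteration of A: state (decimal_value, threshold, current_len)
def stepA (st : Int × Int × Int) (num : Int) : Int × Int × Int :=
  let p : Int × Int :=
    if st.2.1 ≤ num then (st.2.1 * 2, st.2.2 + 1) else (st.2.1, st.2.2)
  -- 2 ** current_len: current_len starts at 1 and only grows, so the Nat exponent is exact
  let dv := st.1 * 2 ^ p.2.toNat
  let dv := PySem.Int.mod (dv + num) (10 ^ 9 + 7)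
  (dv, p.1, p.2)

def concatenate_binary_strings (n : Int) : Int :=
  ((PySem.List.pyRange 1 (n + 1) 1).foldl stepA (0, 2, 1)).1

-- ===== PORT B =====
-- one loop iteration of B: state (total, weight)
def stepB (st : Int × Int) (num : Int) : Int × Int :=
  let total := PySem.Int.mod (st.1 + num * st.2) (10 ^ 9 + 7)
  let weight := PySem.Int.mod (st.2 * 2 ^ PySem.Int.bitLength num) (10 ^ 9 + 7)
  (total, weight)

def concatenate_binary_strings_alt (n : Int) : Int :=
  ((PySem.List.pyRange n 0 (-1)).foldl stepB (0, 1)).1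

-- ===== PRECONDITION & SPEC =====
def Spec_concatenate_binary_strings (n : Int) (out : Int) : Prop := out = concatenate_binary_strings_alt n
instance (n : Int) (out : Int) : Decidable (Spec_concatenate_binary_strings n out) := by unfold Spec_concatenate_binary_strings; infer_instance

-- ===== CLAIM (what is proved, stated in full; the proofs are below) =====
def Claim_equal_concatenate_binary_strings : Prop := ∀ (n : Int), Dom_concatenate_binary_strings n → Spec_concatenate_binary_strings n (concatenate_binary_strings n)

-- ===== LEMMAS AND PROOFS =====

-- bit length of a natural number, as both ports' mathematics sees it
def pvBL (k : Nat) : Nat := PySem.Int.bitLength (k : Int)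

-- exact (un-modded) decimal value of the concatenation of bin(1)..bin(k)
def pvV : Nat → Int
  | 0 => 0
  | k + 1 => pvV k * 2 ^ pvBL (k + 1) + ((k + 1 : Nat) : Int)

-- total number of bits in bin(1)..bin(k)
def pvS : Nat → Nat
  | 0 => 0
  | k + 1 => pvS k + pvBL (k + 1)

-- modular-congruence helpers
lemma pvmod_emod (a M : Int) : Int.ModEq M (a % M) a := Int.emod_emod_of_dvd a dvd_rfl

lemma pvmod_mul_add (a p c M : Int) : (a % M * p + c) % M = (a * p + c) % M :=
  ((pvmod_emod a M).mul (Int.ModEq.refl p)).add (Int.ModEq.refl c)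

lemma pvBL_bounds (m : Nat) (hm : 1 ≤ m) : 2 ^ (pvBL m - 1) ≤ m ∧ m < 2 ^ pvBL m := by
  have h1 := PySem.Int.lt_two_pow_bitLength (m : Int)
  have h2 := PySem.Int.two_pow_bitLength_le (n := (m : Int)) (by exact_mod_cast Nat.one_le_iff_ne_zero.mp hm)
  simpa [pvBL] using ⟨h2, h1⟩

lemma pvBL_pos (m : Nat) (hm : 1 ≤ m) : 1 ≤ pvBL m := by
  rcases pvBL_bounds m hm with ⟨-, h2⟩
  by_contra h
  interval_cases hbl : pvBL m
  · simp at h2; omega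

lemma pvBL_eq (m c : Nat) (hm : 1 ≤ m) (h1 : 2 ^ (c - 1) ≤ m) (h2 : m < 2 ^ c) : pvBL m = c := by
  rcases pvBL_bounds m hm with ⟨hb1, hb2⟩
  have hd := pvBL_pos m hm
  have hc : 1 ≤ c := by
    by_contra h
    have : c = 0 := by omega
    subst this; simp at h2; omega
  have hcd : c - 1 < pvBL m := by
    have : (2 : Nat) ^ (c - 1) < 2 ^ pvBL m := lt_of_le_of_lt h1 hb2
    exact (Nat.pow_lt_pow_iff_right (by norm_num)).mp this
  have hdc : pvBL m - 1 < c := by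
    have : (2 : Nat) ^ (pvBL m - 1) < 2 ^ c := lt_of_le_of_lt hb1 h2
    exact (Nat.pow_lt_pow_iff_right (by norm_num)).mp this
  omega

lemma pvBL_succ (k : Nat) :
    pvBL (k + 1) = if 2 ^ max 1 (pvBL k) ≤ k + 1 then max 1 (pvBL k) + 1 else max 1 (pvBL k) := by
  rcases Nat.eq_zero_or_pos k with hk | hk
  · subst hk
    have : pvBL 0 = 0 := by simp [pvBL, PySem.Int.bitLength_zero]
    rw [this]
    norm_num
    exact pvBL_eq 1 1 le_rfl (by norm_num) (by norm_num)
  · have hb := pvBL_bounds k hk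
    have hp := pvBL_pos k hk
    rw [Nat.max_eq_right hp]
    by_cases h : 2 ^ pvBL k ≤ k + 1
    · rw [if_pos h]
      exact pvBL_eq (k + 1) (pvBL k + 1) (by omega)
        (by simpa using h) (by rw [pow_succ]; omega)
    · rw [if_neg h]
      exact pvBL_eq (k + 1) (pvBL k) (by omega) (by omega) (by omega)

lemma A_fold (k : Nat) :
    (PySem.List.pyRange 1 ((k : Int) + 1) 1).foldl stepA (0, 2, 1)
      = (pvV k % (10 ^ 9 + 7), ((2 ^ max 1 (pvBL k) : Nat) : Int), ((max 1 (pvBL k) : Nat) : Int)) := by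
  induction k with
  | zero =>
    rw [show ((0 : Nat) : Int) + 1 = 1 by norm_num, PySem.List.pyRange_one_eq_nil le_rfl]
    simp [pvV, pvBL, PySem.Int.bitLength_zero]
  | succ k ih =>
    have hsplit : PySem.List.pyRange 1 (((k + 1 : Nat) : Int) + 1) 1
        = PySem.List.pyRange 1 ((k : Int) + 1) 1 ++ [(k : Int) + 1] := by
      have h := PySem.List.pyRange_one_succ_right (a := 1) (b := (k : Int) + 1) (by omega)
      have hc : ((k + 1 : Nat) : Int) + 1 = ((k : Int) + 1) + 1 := by push_cast; ring
      rw [hc, h]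
    rw [hsplit, List.foldl_append, ih]
    simp only [List.foldl_cons, List.foldl_nil]
    by_cases hc : 2 ^ max 1 (pvBL k) ≤ k + 1
    · have hcI : (((2 ^ max 1 (pvBL k) : Nat)) : Int) ≤ (k : Int) + 1 := by exact_mod_cast hc
      have hbl : pvBL (k + 1) = max 1 (pvBL k) + 1 := by rw [pvBL_succ k, if_pos hc]
      have ht : (((max 1 (pvBL k) : Nat) : Int) + 1).toNat = max 1 (pvBL k) + 1 := by omega
      simp only [stepA, if_pos hcI, ht]
      rw [Prod.mk.injEq, Prod.mk.injEq]
      refine ⟨?_, ?_, ?_⟩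
      · rw [PySem.Int.mod_eq_emod_of_pos (by norm_num), pvmod_mul_add]
        congr 1
        simp only [pvV, hbl]
        push_cast
        ring
      · have hmx : max 1 (pvBL (k + 1)) = max 1 (pvBL k) + 1 := by rw [hbl]; omega
        rw [hmx]
        push_cast [pow_succ]
        ring
      · have hmx : max 1 (pvBL (k + 1)) = max 1 (pvBL k) + 1 := by rw [hbl]; omega
        rw [hmx]
        push_cast
        ring
    · have hcI : ¬ ((((2 ^ max 1 (pvBL k) : Nat)) : Int) ≤ (k : Int) + 1) := by exact_mod_cast hc
      have hbl : pvBL (k + 1) = max 1 (pvBL k) := by rw [pvBL_succ k, if_neg hc]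
      have ht : (((max 1 (pvBL k) : Nat) : Int)).toNat = max 1 (pvBL k) := by omega
      simp only [stepA, if_neg hcI, ht]
      rw [Prod.mk.injEq, Prod.mk.injEq]
      refine ⟨?_, ?_, ?_⟩
      · rw [PySem.Int.mod_eq_emod_of_pos (by norm_num), pvmod_mul_add]
        congr 1
        simp only [pvV, hbl]
        push_cast
        ring
      · have hmx : max 1 (pvBL (k + 1)) = max 1 (pvBL k) := by rw [hbl]; omega
        rw [hmx]
      · have hmx : max 1 (pvBL (k + 1)) = max 1 (pvBL k) := by rw [hbl]; omega
        rw [hmx]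

lemma B_fold (k : Nat) (t w : Int) :
    (PySem.List.pyRange (k : Int) 0 (-1)).foldl stepB (t % (10 ^ 9 + 7), w % (10 ^ 9 + 7))
      = ((t + w * pvV k) % (10 ^ 9 + 7), (w * 2 ^ pvS k) % (10 ^ 9 + 7)) := by
  induction k generalizing t w with
  | zero =>
    rw [PySem.List.pyRange_neg_one_eq_nil (by norm_num)]
    simp [pvV, pvS]
  | succ k ih =>
    rw [PySem.List.pyRange_neg_one_cons (by positivity)]
    have hcast : ((k + 1 : Nat) : Int) - 1 = (k : Int) := by push_cast; ring
    rw [List.foldl_cons, hcast]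
    have hstep : stepB (t % (10 ^ 9 + 7), w % (10 ^ 9 + 7)) ((k + 1 : Nat) : Int)
        = ((t % (10 ^ 9 + 7) + ((k + 1 : Nat) : Int) * (w % (10 ^ 9 + 7))) % (10 ^ 9 + 7),
           (w % (10 ^ 9 + 7) * 2 ^ pvBL (k + 1)) % (10 ^ 9 + 7)) := by
      simp only [stepB, PySem.Int.mod_eq_emod_of_pos (by norm_num : (0:Int) < 10 ^ 9 + 7), pvBL]
    rw [hstep, ih]
    rw [Prod.mk.injEq]
    constructor
    · calc (t % (10 ^ 9 + 7) + ((k + 1 : Nat) : Int) * (w % (10 ^ 9 + 7))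
              + w % (10 ^ 9 + 7) * 2 ^ pvBL (k + 1) * pvV k) % (10 ^ 9 + 7)
          = (t + ((k + 1 : Nat) : Int) * w + w * 2 ^ pvBL (k + 1) * pvV k) % (10 ^ 9 + 7) := by
            exact ((pvmod_emod t _).add ((Int.ModEq.refl _).mul (pvmod_emod w _))).add
              (((pvmod_emod w _).mul (Int.ModEq.refl _)).mul (Int.ModEq.refl _))
        _ = (t + w * pvV (k + 1)) % (10 ^ 9 + 7) := by
            congr 1
            simp only [pvV]
            ring
    · calc (w % (10 ^ 9 + 7) * 2 ^ pvBL (k + 1) * 2 ^ pvS k) % (10 ^ 9 + 7)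
          = (w * 2 ^ pvBL (k + 1) * 2 ^ pvS k) % (10 ^ 9 + 7) := by
            exact ((pvmod_emod w _).mul (Int.ModEq.refl _)).mul (Int.ModEq.refl _)
        _ = (w * 2 ^ pvS (k + 1)) % (10 ^ 9 + 7) := by
            congr 1
            simp only [pvS]
            rw [pow_add]
            ring

-- ===== VERDICT (by name: the statement is the Claim_ definition above) =====
theorem concatenate_binary_strings_spec : Claim_equal_concatenate_binary_strings := by
  intro n _
  unfold Spec_concatenate_binary_strings concatenate_binary_strings concatenate_binary_strings_alt
  rcases (by omega : n ≤ 0 ∨ 0 < n) with hn | hn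
  · rw [PySem.List.pyRange_one_eq_nil (by omega), PySem.List.pyRange_neg_one_eq_nil (by omega)]
    rfl
  · have hk : n = ((n.toNat : Nat) : Int) := by omega
    rw [hk, A_fold,
      show ((0 : Int), (1 : Int)) = ((0 : Int) % (10 ^ 9 + 7), (1 : Int) % (10 ^ 9 + 7)) by norm_num,
      B_fold]
    simp
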